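-- pv_equiv track=rewrite | github.com/durgaprasad1997/Anti_Microbial_peptide_Classification | Anti peptide Classification/Main_Step2_v2.py | convertToCSVFile
-- ===== SOURCE A (Python) =====
-- def convertToCSVFile(content):
--     data = False
--     header = ""
--     newContent = []
--     for line in content:
--         if not data:
--             if "@attribute" in line:
--                 attri = line.split()
--                 columnName = attri[attri.index("@attribute")+1]
--                 header = header + columnName + ","
--             elif "@data" in line:
--                 data = True
--                 header = header[:-1]
--                 header += '\n'
--                 newContent.append(header)
--         else:
--             newContent.append(line)
--     return newContent
-- ===== SOURCE B (Python) =====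
-- def _column_name(line):
--     tokens = line.split()
--     return tokens[tokens.index("@attribute") + 1]
--
--
-- def convertToCSVFile(content):
--     split = next((i for i, line in enumerate(content)
--                   if "@data" in line and "@attribute" not in line), None)
--     if split is None:
--         return []
--     names = [_column_name(line) for line in content[:split] if "@attribute" in line]
--     return [",".join(names) + "\n"] + content[split + 1:]
-- ===== Notes on version B (the rewrite author's own statement) =====
-- stated objective: alternative
-- what changed: A is a single stateful pass with a data-flag, a comma-accumulated header string (trailing comma stripped at the @data line) and an output accumulator; B first locates the split index (first line containing '@data' but not '@attribute'), returns an empty result if none, then builds the header by join over the column names extracted from the '@attribute' lines of the prefix and returns it consed onto the slice after the split.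
-- crash fix: When no '@data' split line exists but some scanned line contains '@attribute' without a well-formed '@attribute <name>' token pair, A raises ValueError or IndexError while B returns the empty list. — e.g. on convertToCSVFile(["@attribute"]): A raises IndexError, B returns []
import Mathlib
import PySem

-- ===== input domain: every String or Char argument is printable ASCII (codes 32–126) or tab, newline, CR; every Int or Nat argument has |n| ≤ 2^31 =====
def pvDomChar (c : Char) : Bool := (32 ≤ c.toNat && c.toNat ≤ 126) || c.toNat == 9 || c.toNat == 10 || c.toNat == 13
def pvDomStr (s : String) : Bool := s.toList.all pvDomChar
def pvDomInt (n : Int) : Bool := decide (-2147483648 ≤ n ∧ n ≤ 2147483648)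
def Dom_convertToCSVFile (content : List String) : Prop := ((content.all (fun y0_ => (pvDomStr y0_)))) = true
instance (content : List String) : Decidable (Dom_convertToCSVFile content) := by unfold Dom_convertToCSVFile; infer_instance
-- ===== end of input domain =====

-- B replaces A's single stateful pass (data-flag, comma-accumulated header, output accumulator)
-- by: find the split index, join the extracted column names of the prefix, cons onto the tail slice (objective: alternative).


-- ===== PORT A =====
-- attri[attri.index("@attribute")+1]; none = Python ValueError/IndexError, excluded by Pre_
def pvExtractA (line : String) : String :=
  let attri := PySem.Str.split₀ line
  ((PySem.List.index? attri "@attribute").bind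
    (fun j => PySem.List.pyGet? attri ((j : Int) + 1))).getD ""

def pvLoopA : Bool → String → List String → List String → List String
  | _, _, acc, [] => acc
  | data, header, acc, line :: rest =>
    if !data then
      if PySem.Str.isIn "@attribute" line then
        pvLoopA data (header ++ pvExtractA line ++ ",") acc rest
      else if PySem.Str.isIn "@data" line then
        pvLoopA true (PySem.Str.slice header none (some (-1)) ++ "\n")
          (acc ++ [PySem.Str.slice header none (some (-1)) ++ "\n"]) rest
      else pvLoopA data header acc rest
    else pvLoopA data header (acc ++ [line]) rest

def convertToCSVFile (content : List String) : List String :=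
  pvLoopA false "" [] content

-- ===== PORT B =====
-- tokens[tokens.index("@attribute")+1]; none = Python ValueError/IndexError, excluded by Pre_
def pvColumnName (line : String) : String :=
  let tokens := PySem.Str.split₀ line
  ((PySem.List.index? tokens "@attribute").bind
    (fun j => PySem.List.pyGet? tokens ((j : Int) + 1))).getD ""

-- next((i for i, line in enumerate(content) if "@data" in line and "@attribute" not in line), None)
def pvFindSplit : List String → Option Nat
  | [] => none
  | line :: rest =>
    if PySem.Str.isIn "@data" line && !PySem.Str.isIn "@attribute" line then some 0
    else (pvFindSplit rest).map (· + 1)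

def convertToCSVFile_alt (content : List String) : List String :=
  match pvFindSplit content with
  | none => []
  | some split =>
    let names := ((PySem.List.slice content none (some (split : Int))).filter
      (fun line => PySem.Str.isIn "@attribute" line)).map pvColumnName
    (PySem.Str.join "," names ++ "\n") :: PySem.List.slice content (some ((split : Int) + 1)) none

-- ===== PRECONDITION & SPEC =====
-- Pre_ excludes exactly the inputs where A raises: a line scanned before the first pure-'@data'
-- line that contains '@attribute' as a substring but not as a whole token followed by a name token.
def Pre_convertToCSVFile (content : List String) : Prop :=
  ∀ line ∈ content.takeWhile
      (fun l => !(PySem.Str.isIn "@data" l && !PySem.Str.isIn "@attribute" l)),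
    PySem.Str.isIn "@attribute" line = true →
      ("@attribute" ∈ PySem.Str.split₀ line ∧
        (PySem.Str.split₀ line).idxOf "@attribute" + 1 < (PySem.Str.split₀ line).length)
instance (content : List String) : Decidable (Pre_convertToCSVFile content) := by
  unfold Pre_convertToCSVFile; infer_instance

def pvWitness_convertToCSVFile : List String :=
  ["@attribute name string", "@attribute class {0,1}", "@data", "abc,1"]

-- When no '@data' split line exists but some scanned line contains '@attribute' without a
-- well-formed '@attribute <name>' token pair, A raises ValueError/IndexError while B returns the empty list.
def Raises_convertToCSVFile (content : List String) : Prop :=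
  (∀ line ∈ content, !(PySem.Str.isIn "@data" line && !PySem.Str.isIn "@attribute" line)) ∧
  (∃ line ∈ content, PySem.Str.isIn "@attribute" line = true ∧
    ¬("@attribute" ∈ PySem.Str.split₀ line ∧
      (PySem.Str.split₀ line).idxOf "@attribute" + 1 < (PySem.Str.split₀ line).length))
instance (content : List String) : Decidable (Raises_convertToCSVFile content) := by
  unfold Raises_convertToCSVFile; infer_instance

def pvRaiseWitness_convertToCSVFile : List String := ["@attribute"]
def pvRaiseWitnessOut_convertToCSVFile : List String := []

def Spec_convertToCSVFile (content : List String) (out : List String) : Prop := out = convertToCSVFile_alt content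
instance (content : List String) (out : List String) : Decidable (Spec_convertToCSVFile content out) := by unfold Spec_convertToCSVFile; infer_instance

-- ===== CLAIM (what is proved, stated in full; the proofs are below) =====
def Claim_equal_convertToCSVFile : Prop := ∀ (content : List String), Dom_convertToCSVFile content → Pre_convertToCSVFile content → Spec_convertToCSVFile content (convertToCSVFile content)

def Claim_raises_convertToCSVFile : Prop :=
  (∀ (content : List String), Dom_convertToCSVFile content → Raises_convertToCSVFile content → ¬ Pre_convertToCSVFile content) ∧
  (Dom_convertToCSVFile (pvRaiseWitness_convertToCSVFile) ∧ Raises_convertToCSVFile (pvRaiseWitness_convertToCSVFile) ∧ convertToCSVFile_alt (pvRaiseWitness_convertToCSVFile) = pvRaiseWitnessOut_convertToCSVFile)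

-- ===== LEMMAS AND PROOFS =====

-- names collected so far, rendered the way A's header accumulates them: each name followed by ","
def pvChain : List String → String
  | [] => ""
  | n :: ns => n ++ "," ++ pvChain ns

lemma pvChain_append (hd : List String) (e : String) :
    pvChain (hd ++ [e]) = pvChain hd ++ e ++ "," := by
  induction hd with
  | nil => simp [pvChain]
  | cons n ns ih => simp [pvChain, ih, String.append_assoc]

lemma pvChain_toList (hd : List String) :
    (pvChain hd).toList = (hd.map (fun n => n.toList ++ [','])).flatten := by
  induction hd with
  | nil => simp [pvChain]
  | cons n ns ih => simp [pvChain, ih]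

lemma dropLast_flatten_comma (l : List (List Char)) :
    (l.map (· ++ [','])).flatten.dropLast = PySem.Chars.join [','] l := by
  induction l with
  | nil => simp [PySem.Chars.join_nil]
  | cons x ys ih =>
    cases ys with
    | nil => simp [PySem.Chars.join_singleton]
    | cons y ys' =>
      rw [List.map_cons, List.flatten_cons,
        List.dropLast_append_of_ne_nil (by simp), ih, PySem.Chars.join_cons_cons _ _ _ _]

lemma pvChain_strip (hd : List String) :
    PySem.Str.slice (pvChain hd) none (some (-1)) = PySem.Str.join "," hd := by
  apply String.toList_inj.mp
  have h1 : (PySem.Str.slice (pvChain hd) none (some (-1))).toList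
      = (pvChain hd).toList.dropLast := by
    simp [PySem.List.slice_to_neg_one]
  rw [h1, pvChain_toList,
    show (List.map (fun n : String => n.toList ++ [',']) hd)
        = (hd.map String.toList).map (· ++ [',']) by simp [List.map_map],
    dropLast_flatten_comma]
  simp

lemma pvLoopA_true (rest : List String) (header : String) (acc : List String) :
    pvLoopA true header acc rest = acc ++ rest := by
  induction rest generalizing acc with
  | nil => simp [pvLoopA]
  | cons l ls ih => simp [pvLoopA, ih]

lemma pvLoopA_key (rest : List String) (hd : List String) :
    pvLoopA false (pvChain hd) [] rest =
      match pvFindSplit rest with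
      | none => []
      | some i =>
        (PySem.Str.join ","
            (hd ++ ((rest.take i).filter (fun l => PySem.Str.isIn "@attribute" l)).map pvColumnName)
          ++ "\n") :: rest.drop (i + 1) := by
  induction rest generalizing hd with
  | nil => simp [pvLoopA, pvFindSplit]
  | cons l ls ih =>
    cases hattr : PySem.Str.isIn "@attribute" l with
    | true =>
      rw [show pvLoopA false (pvChain hd) [] (l :: ls)
            = pvLoopA false (pvChain hd ++ pvExtractA l ++ ",") [] ls by
          simp [pvLoopA, hattr, -PySem.Str.isIn_eq]]
      rw [show pvExtractA l = pvColumnName l from rfl, ← pvChain_append,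
        ih (hd ++ [pvColumnName l])]
      rw [show pvFindSplit (l :: ls) = (pvFindSplit ls).map (· + 1) by
          simp [pvFindSplit, hattr, -PySem.Str.isIn_eq]]
      cases hfs : pvFindSplit ls with
      | none => simp
      | some i => simp [hattr, -PySem.Str.isIn_eq]
    | false =>
      cases hdata : PySem.Str.isIn "@data" l with
      | true =>
        rw [show pvLoopA false (pvChain hd) [] (l :: ls)
              = pvLoopA true (PySem.Str.slice (pvChain hd) none (some (-1)) ++ "\n")
                  ([] ++ [PySem.Str.slice (pvChain hd) none (some (-1)) ++ "\n"]) ls by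
            simp [pvLoopA, hattr, hdata, -PySem.Str.isIn_eq]]
        rw [pvLoopA_true, pvChain_strip]
        rw [show pvFindSplit (l :: ls) = some 0 by
            simp [pvFindSplit, hattr, hdata, -PySem.Str.isIn_eq]]
        simp
      | false =>
        rw [show pvLoopA false (pvChain hd) [] (l :: ls)
              = pvLoopA false (pvChain hd) [] ls by
            simp [pvLoopA, hattr, hdata, -PySem.Str.isIn_eq]]
        rw [ih hd]
        rw [show pvFindSplit (l :: ls) = (pvFindSplit ls).map (· + 1) by
            simp [pvFindSplit, hdata, -PySem.Str.isIn_eq]]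
        cases hfs : pvFindSplit ls with
        | none => simp
        | some i => simp [hattr, -PySem.Str.isIn_eq]

theorem pv_equal : ∀ content, convertToCSVFile content = convertToCSVFile_alt content := by
  intro content
  have h := pvLoopA_key content []
  simp only [pvChain] at h
  rw [convertToCSVFile, h, convertToCSVFile_alt]
  cases hfs : pvFindSplit content with
  | none => rfl
  | some i =>
    simp only [List.nil_append]
    rw [show ((i : Int) + 1) = ((i + 1 : Nat) : Int) by push_cast; ring]
    simp only [PySem.List.slice_to_natCast, PySem.List.slice_from_natCast]

-- ===== VERDICT (by name: the statement is the Claim_ definition above) =====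
theorem convertToCSVFile_spec : Claim_equal_convertToCSVFile := by
  intro content _ _
  unfold Spec_convertToCSVFile
  exact pv_equal content

theorem convertToCSVFile_raises : Claim_raises_convertToCSVFile := by
  unfold Claim_raises_convertToCSVFile
  refine ⟨?_, by decide⟩
  intro content _ hr hpre
  obtain ⟨h1, l, hl, hattr, hbad⟩ := hr
  exact hbad (hpre l (by rw [List.takeWhile_eq_self_iff.mpr h1]; exact hl) hattr)

-- self-check: the raise witness lies outside Pre_, so the equivalence claim says nothing about it
theorem pvRaiseWitness_outside_Pre_ok : ¬ Pre_convertToCSVFile pvRaiseWitness_convertToCSVFile :=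
  convertToCSVFile_raises.1 pvRaiseWitness_convertToCSVFile (by decide) convertToCSVFile_raises.2.2.1
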